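-- pv_equiv track=rewrite | github.com/juancardoso/LFA-Exercices | ThompsonsConstruction.py | getAllStatesNode
-- ===== SOURCE A (Python) =====
-- E = "&"
--
-- def getAllStatesNode(idNumber,weight,edges):
--     dfaedge = getStatsFromNode(idNumber,weight,edges)
--     lenDfaedge = 0
--
--     while len(dfaedge) != lenDfaedge:
--         lenDfaedge = len(dfaedge)
--         for e in dfaedge:
--             addNodes = getStatsFromNode(e,weight,edges)
--             if len(addNodes) > 0:
--                 for i in addNodes:
--                     if not i in dfaedge:
--                         dfaedge.append(i)
--
--     return dfaedge
--
-- def getStatsFromNode(idNumber,weight,edges,vazio = True):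
--     #Pega todos os edges que o no do idNumber chega
--     dfaedge = []
--     for e in edges:
--         if e[0] == idNumber:
--             if e[2] == weight or (vazio and e[2] == E):
--                 if not e[1] in dfaedge:
--                     dfaedge.append(e[1])
--
--     return dfaedge
-- ===== SOURCE B (Python) =====
-- E = "&"
--
-- def getAllStatesNode(idNumber, weight, edges):
--     # Index the (well-formed) edges into an adjacency dict once, then one BFS worklist pass.
--     adj = {}
--     for e in edges:
--         if len(e) >= 3 and (e[2] == weight or e[2] == E):
--             adj.setdefault(e[0], []).append(e[1])
--     result = []
--     seen = set()
--     for t in adj.get(idNumber, ()):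
--         if t not in seen:
--             seen.add(t)
--             result.append(t)
--     i = 0
--     while i < len(result):
--         for t in adj.get(result[i], ()):
--             if t not in seen:
--                 seen.add(t)
--                 result.append(t)
--         i += 1
--     return result
-- ===== Notes on version B (the rewrite author's own statement) =====
-- stated objective: alternative
-- what changed: A recomputes each node's successors by scanning the whole edge list per reached node inside a fixpoint while-loop of repeated passes; B indexes the edges into an adjacency dict once and does a single BFS worklist pass with a seen-set membership test (skipping shorter-than-triple edges, which A can only ignore or crash on).
-- outside the precondition, e.g. on getAllStatesNode('a', 'w', [('x', 'y', 'w'), ('y', 'z')]): A returns [], B returns []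
import Mathlib
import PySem

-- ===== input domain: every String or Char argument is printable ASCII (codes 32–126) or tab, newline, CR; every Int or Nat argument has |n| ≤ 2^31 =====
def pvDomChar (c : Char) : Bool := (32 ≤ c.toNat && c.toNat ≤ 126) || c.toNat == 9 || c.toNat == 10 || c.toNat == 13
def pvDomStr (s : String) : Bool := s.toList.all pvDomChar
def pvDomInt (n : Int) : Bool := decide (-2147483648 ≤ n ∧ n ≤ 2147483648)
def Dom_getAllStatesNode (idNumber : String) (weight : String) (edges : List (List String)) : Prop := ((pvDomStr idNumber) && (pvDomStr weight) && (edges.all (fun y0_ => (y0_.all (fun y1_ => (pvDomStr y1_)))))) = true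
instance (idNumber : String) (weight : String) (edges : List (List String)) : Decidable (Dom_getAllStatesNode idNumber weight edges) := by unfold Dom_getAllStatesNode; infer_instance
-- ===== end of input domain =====

-- B replaces A's repeated full-edge-list scans and outer fixpoint passes by a one-time
-- adjacency index plus a single BFS worklist pass (objective: alternative); B skips edges shorter
-- than a triple, which A can only ignore (unreached) or raise IndexError on (reached).
-- Under Pre_ every index access below is in range, so 'e.getD i ""' is exactly Python's e[i].

-- ===== PORT A =====
-- port of getStatsFromNode (vazio keeps its Python default as an explicit parameter)
def getStatsFromNode (idNumber : String) (weight : String) (edges : List (List String)) (vazio : Bool) : List String :=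
  edges.foldl (fun dfaedge e =>
    if e.getD 0 "" = idNumber then
      if e.getD 2 "" = weight ∨ (vazio = true ∧ e.getD 2 "" = "&") then
        if e.getD 1 "" ∈ dfaedge then dfaedge else dfaedge ++ [e.getD 1 ""]
      else dfaedge
    else dfaedge) []

-- Python's 'for e in dfaedge' iterates by index over the list while it grows; fuel
-- (always sufficient, see the proofs) only totalizes the same computation.
def aFor (weight : String) (edges : List (List String)) : Nat → Nat → List String → List String
  | 0, _, dfaedge => dfaedge
  | fuel+1, i, dfaedge =>
    if i < dfaedge.length then
      let addNodes := getStatsFromNode (dfaedge.getD i "") weight edges true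
      aFor weight edges fuel (i+1)
        (if 0 < addNodes.length then
          addNodes.foldl (fun a n => if n ∈ a then a else a ++ [n]) dfaedge
        else dfaedge)
    else dfaedge

-- the outer 'while len(dfaedge) != lenDfaedge' loop (fuel edges.length + 2 is sufficient)
def aWhile (weight : String) (edges : List (List String)) : Nat → Nat → List String → List String
  | 0, _, dfaedge => dfaedge
  | fuel+1, lenDfaedge, dfaedge =>
    if dfaedge.length ≠ lenDfaedge then
      aWhile weight edges fuel dfaedge.length (aFor weight edges (dfaedge.length + edges.length) 0 dfaedge)
    else dfaedge

def getAllStatesNode (idNumber : String) (weight : String) (edges : List (List String)) : List String :=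
  aWhile weight edges (edges.length + 2) 0 (getStatsFromNode idNumber weight edges true)

-- ===== PORT B =====
-- adj.setdefault(e[0], []).append(e[1])
def bBuildAdj (weight : String) (edges : List (List String)) : PySem.Dict String (List String) :=
  edges.foldl (fun adj e =>
    if 3 ≤ e.length ∧ (e.getD 2 "" = weight ∨ e.getD 2 "" = "&") then
      adj.insert (e.getD 0 "") (adj.getD (e.getD 0 "") [] ++ [e.getD 1 ""])
    else adj) PySem.Dict.empty

-- 'for t in L: if t not in seen: seen.add(t); result.append(t)' on the state (result, seen)
def bCollect (st : List String × PySem.Set String) (L : List String) : List String × PySem.Set String :=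
  L.foldl (fun p t => if PySem.Set.contains p.2 t then p else (p.1 ++ [t], PySem.Set.add p.2 t)) st

-- 'while i < len(result)': worklist scan by index; fuel (always sufficient) totalizes it
def bLoop (adj : PySem.Dict String (List String)) : Nat → Nat → List String × PySem.Set String → List String × PySem.Set String
  | 0, _, st => st
  | fuel+1, i, st =>
    if i < st.1.length then
      bLoop adj fuel (i+1) (bCollect st (adj.getD (st.1.getD i "") []))
    else st

def getAllStatesNode_alt (idNumber : String) (weight : String) (edges : List (List String)) : List String :=
  let adj := bBuildAdj weight edges
  let st0 := bCollect ([], PySem.Set.empty) (adj.getD idNumber [])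
  (bLoop adj (st0.1.length + edges.length) 0 st0).1

-- ===== PRECONDITION & SPEC =====
-- A accesses e[2] of an edge only lazily, when its source e[0] gets queried during the search, and
-- so raises IndexError on empty edges and on shorter-than-triple edges whose source is reached.
-- Pre_ excludes those inputs by a closed-form over-approximation of the queried set: every edge is
-- either a full triple, or nonempty with a source that is neither idNumber nor the target of any
-- traversable (full-triple, weight- or epsilon-labelled) edge, so A can never query it; B instead
-- reads every edge once and skips the malformed ones.
def Pre_getAllStatesNode (idNumber : String) (weight : String) (edges : List (List String)) : Prop :=
  ∀ e ∈ edges, 3 ≤ e.length ∨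
    (1 ≤ e.length ∧ e.getD 0 "" ≠ idNumber ∧
      ∀ e' ∈ edges, 3 ≤ e'.length → (e'.getD 2 "" = weight ∨ e'.getD 2 "" = "&") →
        e.getD 0 "" ≠ e'.getD 1 "")
instance (idNumber : String) (weight : String) (edges : List (List String)) : Decidable (Pre_getAllStatesNode idNumber weight edges) := by unfold Pre_getAllStatesNode; infer_instance

def pvWitness_getAllStatesNode : String × String × List (List String) :=
  ("q0", "a", [["q0", "q1", "a"], ["q1", "q2", "&"], ["q2", "q0", "b"]])

def Spec_getAllStatesNode (idNumber : String) (weight : String) (edges : List (List String)) (out : List String) : Prop := out = getAllStatesNode_alt idNumber weight edges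
instance (idNumber : String) (weight : String) (edges : List (List String)) (out : List String) : Decidable (Spec_getAllStatesNode idNumber weight edges out) := by unfold Spec_getAllStatesNode; infer_instance

-- ===== CLAIM (what is proved, stated in full; the proofs are below) =====
def Claim_equal_getAllStatesNode : Prop := ∀ (idNumber : String) (weight : String) (edges : List (List String)), Dom_getAllStatesNode idNumber weight edges → Pre_getAllStatesNode idNumber weight edges → Spec_getAllStatesNode idNumber weight edges (getAllStatesNode idNumber weight edges)

-- ===== LEMMAS AND PROOFS =====

-- 'extend acc with the elements of L not yet present' — the shape of every append-if-absent loop above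
def pvExt (acc L : List String) : List String :=
  L.foldl (fun a n => if n ∈ a then a else a ++ [n]) acc

-- the plain (non-deduplicated) list of weight/epsilon successors of n, in edge order
def pvCollect (weight : String) (edges : List (List String)) (n : String) : List String :=
  edges.foldr (fun e r => if e.getD 0 "" = n ∧ (e.getD 2 "" = weight ∨ e.getD 2 "" = "&") then e.getD 1 "" :: r else r) []

theorem pvExt_cons (acc : List String) (t : String) (L : List String) :
    pvExt acc (t :: L) = pvExt (if t ∈ acc then acc else acc ++ [t]) L := by
  simp only [pvExt, List.foldl_cons]

theorem pvCollect_cons (weight : String) (e : List String) (rest : List (List String)) (n : String) :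
    pvCollect weight (e :: rest) n =
      if e.getD 0 "" = n ∧ (e.getD 2 "" = weight ∨ e.getD 2 "" = "&") then
        e.getD 1 "" :: pvCollect weight rest n
      else pvCollect weight rest n := rfl

-- the successors that B's adjacency dict records for n (well-formed edges only)
def pvCollectB (weight : String) (edges : List (List String)) (n : String) : List String :=
  edges.foldr (fun e r =>
    if 3 ≤ e.length ∧ e.getD 0 "" = n ∧ (e.getD 2 "" = weight ∨ e.getD 2 "" = "&") then
      e.getD 1 "" :: r
    else r) []

theorem pvCollectB_cons (weight : String) (e : List String) (rest : List (List String)) (n : String) :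
    pvCollectB weight (e :: rest) n =
      if 3 ≤ e.length ∧ e.getD 0 "" = n ∧ (e.getD 2 "" = weight ∨ e.getD 2 "" = "&") then
        e.getD 1 "" :: pvCollectB weight rest n
      else pvCollectB weight rest n := rfl

-- the targets of the traversable edges: a superset of every node the search can ever append
def pvTgts (weight : String) : List (List String) → List String
  | [] => []
  | e :: rest =>
    if 3 ≤ e.length ∧ (e.getD 2 "" = weight ∨ e.getD 2 "" = "&") then
      e.getD 1 "" :: pvTgts weight rest
    else pvTgts weight rest

theorem mem_pvTgts (weight : String) : ∀ (edges : List (List String)) (n : String),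
    n ∈ pvTgts weight edges →
      ∃ e' ∈ edges, 3 ≤ e'.length ∧ (e'.getD 2 "" = weight ∨ e'.getD 2 "" = "&") ∧
        e'.getD 1 "" = n := by
  intro edges
  induction edges with
  | nil => intro n hn; cases hn
  | cons e rest ih =>
    intro n hn
    unfold pvTgts at hn
    by_cases h : 3 ≤ e.length ∧ (e.getD 2 "" = weight ∨ e.getD 2 "" = "&")
    · rw [if_pos h] at hn
      rcases List.mem_cons.mp hn with h' | h'
      · exact ⟨e, by simp, h.1, h.2, h'.symm⟩
      · obtain ⟨e', he', hq⟩ := ih n h'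
        exact ⟨e', by simp [he'], hq⟩
    · rw [if_neg h] at hn
      obtain ⟨e', he', hq⟩ := ih n hn
      exact ⟨e', by simp [he'], hq⟩

theorem mem_pvExt (L : List String) : ∀ (acc : List String) (x : String), x ∈ pvExt acc L ↔ x ∈ acc ∨ x ∈ L := by
  induction L with
  | nil => intro acc x; simp [pvExt]
  | cons t L ih =>
    intro acc x
    rw [pvExt_cons]
    by_cases h : t ∈ acc
    · rw [if_pos h, ih]
      simp only [List.mem_cons]
      constructor
      · rintro (h1 | h1); exacts [Or.inl h1, Or.inr (Or.inr h1)]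
      · rintro (h1 | h1 | h1); exacts [Or.inl h1, Or.inl (h1 ▸ h), Or.inr h1]
    · rw [if_neg h, ih]
      simp only [List.mem_append, List.mem_cons]
      tauto

theorem pvExt_eq_nil (L : List String) (h : pvExt [] L = []) : L = [] := by
  cases L with
  | nil => rfl
  | cons t L =>
    exfalso
    have ht : t ∈ pvExt [] (t :: L) := (mem_pvExt _ _ _).2 (Or.inr (by simp))
    rw [h] at ht; simp at ht

theorem pvExt_pvExt (L : List String) : ∀ (A B : List String), pvExt A (pvExt B L) = pvExt (pvExt A B) L := by
  induction L with
  | nil => intro A B; rfl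
  | cons t L ih =>
    intro A B
    have key : pvExt A (if t ∈ B then B else B ++ [t]) =
        (if t ∈ pvExt A B then pvExt A B else pvExt A B ++ [t]) := by
      by_cases h : t ∈ B
      · rw [if_pos h, if_pos ((mem_pvExt B A t).2 (Or.inr h))]
      · rw [if_neg h]
        simp only [pvExt, List.foldl_append, List.foldl_cons, List.foldl_nil]
    rw [pvExt_cons, pvExt_cons, ih, key]

theorem pvExt_sub (L : List String) : ∀ (A : List String), (∀ y ∈ L, y ∈ A) → pvExt A L = A := by
  induction L with
  | nil => intro A _; rfl
  | cons t L ih =>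
    intro A h
    rw [pvExt_cons, if_pos (h t (by simp))]
    exact ih A fun y hy => h y (by simp [hy])

theorem pvExt_append_suffix (L : List String) : ∀ (A : List String), ∃ s, pvExt A L = A ++ s := by
  induction L with
  | nil => intro A; exact ⟨[], by simp [pvExt]⟩
  | cons t L ih =>
    intro A
    rw [pvExt_cons]
    by_cases h : t ∈ A
    · rw [if_pos h]; exact ih A
    · rw [if_neg h]
      obtain ⟨s, hs⟩ := ih (A ++ [t])
      exact ⟨t :: s, by rw [hs]; simp⟩

-- A's per-edge update in getStatsFromNode (with vazio = true), named for the proofs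
def pvStepA (n weight : String) (dfaedge e : List String) : List String :=
  if e.getD 0 "" = n then
    if e.getD 2 "" = weight ∨ (true = true ∧ e.getD 2 "" = "&") then
      if e.getD 1 "" ∈ dfaedge then dfaedge else dfaedge ++ [e.getD 1 ""]
    else dfaedge
  else dfaedge

theorem pvStepA_eq (n weight : String) (acc e : List String) :
    pvStepA n weight acc e =
      if e.getD 0 "" = n ∧ (e.getD 2 "" = weight ∨ e.getD 2 "" = "&") then
        (if e.getD 1 "" ∈ acc then acc else acc ++ [e.getD 1 ""])
      else acc := by
  unfold pvStepA
  split_ifs <;> first | rfl | tauto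

theorem getStats_foldl (weight n : String) : ∀ (edges : List (List String)) (acc : List String),
    List.foldl (pvStepA n weight) acc edges = pvExt acc (pvCollect weight edges n) := by
  intro edges
  induction edges with
  | nil => intro acc; rfl
  | cons e rest ih =>
    intro acc
    rw [List.foldl_cons, pvStepA_eq, pvCollect_cons]
    by_cases hP : e.getD 0 "" = n ∧ (e.getD 2 "" = weight ∨ e.getD 2 "" = "&")
    · rw [if_pos hP, if_pos hP, ih, pvExt_cons]
    · rw [if_neg hP, if_neg hP, ih]

theorem getStats_eq (n weight : String) (edges : List (List String)) :
    getStatsFromNode n weight edges true = pvExt [] (pvCollect weight edges n) :=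
  getStats_foldl weight n edges []

theorem adj_foldl (weight n : String) : ∀ (edges : List (List String)) (d : PySem.Dict String (List String)),
    (List.foldl (fun adj e =>
      if 3 ≤ e.length ∧ (e.getD 2 "" = weight ∨ e.getD 2 "" = "&") then
        adj.insert (e.getD 0 "") (adj.getD (e.getD 0 "") [] ++ [e.getD 1 ""])
      else adj) d edges).getD n [] = d.getD n [] ++ pvCollectB weight edges n := by
  intro edges
  induction edges with
  | nil => intro d; simp [pvCollectB]
  | cons e rest ih =>
    intro d
    simp only [List.foldl_cons, pvCollectB_cons]
    by_cases h2 : 3 ≤ e.length ∧ (e.getD 2 "" = weight ∨ e.getD 2 "" = "&")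
    · rw [if_pos h2, ih, PySem.Dict.getD_insert]
      by_cases h1 : e.getD 0 "" = n
      · rw [if_pos (show n = e.getD 0 "" from h1.symm),
          if_pos (show 3 ≤ e.length ∧ e.getD 0 "" = n ∧ (e.getD 2 "" = weight ∨ e.getD 2 "" = "&") from
            ⟨h2.1, h1, h2.2⟩),
          h1, List.append_assoc, List.singleton_append]
      · rw [if_neg (show ¬ n = e.getD 0 "" from fun h => h1 h.symm),
          if_neg (show ¬ (3 ≤ e.length ∧ e.getD 0 "" = n ∧ (e.getD 2 "" = weight ∨ e.getD 2 "" = "&")) from by tauto)]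
    · rw [if_neg h2, ih,
        if_neg (show ¬ (3 ≤ e.length ∧ e.getD 0 "" = n ∧ (e.getD 2 "" = weight ∨ e.getD 2 "" = "&")) from by tauto)]

-- on a node all of whose in-pointing edges are full triples, A's scan and B's dict agree
theorem collect_eq (weight n : String) : ∀ (edges : List (List String)),
    (∀ e ∈ edges, e.getD 0 "" = n → 3 ≤ e.length) →
    pvCollect weight edges n = pvCollectB weight edges n := by
  intro edges
  induction edges with
  | nil => intro _; rfl
  | cons e rest ih =>
    intro hshort
    rw [pvCollect_cons, pvCollectB_cons]
    have ihr := ih fun e' he' h => hshort e' (by simp [he']) h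
    by_cases h1 : e.getD 0 "" = n
    · have hlen : 3 ≤ e.length := hshort e (by simp) h1
      by_cases h2 : e.getD 2 "" = weight ∨ e.getD 2 "" = "&"
      · rw [if_pos ⟨h1, h2⟩, if_pos ⟨hlen, h1, h2⟩, ihr]
      · rw [if_neg (by tauto), if_neg (by tauto), ihr]
    · rw [if_neg (by tauto), if_neg (by tauto), ihr]

theorem collectB_sub_tgts (weight : String) : ∀ (edges : List (List String)) (n y : String),
    y ∈ pvCollectB weight edges n → y ∈ pvTgts weight edges := by
  intro edges
  induction edges with
  | nil => intro n y hy; cases hy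
  | cons e rest ih =>
    intro n y hy
    rw [pvCollectB_cons] at hy
    unfold pvTgts
    by_cases h : 3 ≤ e.length ∧ e.getD 0 "" = n ∧ (e.getD 2 "" = weight ∨ e.getD 2 "" = "&")
    · rw [if_pos h] at hy
      rw [if_pos ⟨h.1, h.2.2⟩]
      rcases List.mem_cons.mp hy with h' | h'
      · rw [h']; exact List.mem_cons_self ..
      · exact List.mem_cons_of_mem _ (ih n y h')
    · rw [if_neg h] at hy
      by_cases h2 : 3 ≤ e.length ∧ (e.getD 2 "" = weight ∨ e.getD 2 "" = "&")
      · rw [if_pos h2]; exact List.mem_cons_of_mem _ (ih n y hy)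
      · rw [if_neg h2]; exact ih n y hy

theorem adj_getD (weight : String) (edges : List (List String)) (n : String) :
    (bBuildAdj weight edges).getD n [] = pvCollectB weight edges n := by
  have : (PySem.Dict.empty : PySem.Dict String (List String)).getD n [] = [] := by
    simp [pysem]
  have h := adj_foldl weight n edges PySem.Dict.empty
  rw [this, List.nil_append] at h
  exact h

theorem bCollect_pair (L : List String) : ∀ (xs : List String),
    bCollect (xs, xs) L = (pvExt xs L, pvExt xs L) := by
  induction L with
  | nil => intro xs; rfl
  | cons t L ih =>
    intro xs
    have step : bCollect (xs, (xs : PySem.Set String)) (t :: L) =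
        bCollect (if PySem.Set.contains (xs : PySem.Set String) t then (xs, xs)
                  else (xs ++ [t], PySem.Set.add xs t)) L := by
      simp only [bCollect, List.foldl_cons]
    rw [step, pvExt_cons]
    by_cases h : t ∈ xs
    · rw [if_pos (show PySem.Set.contains (xs : PySem.Set String) t = true from by
        simp [PySem.Set.contains]; exact h), if_pos h, ih]
    · have hc : PySem.Set.contains (xs : PySem.Set String) t = false := by
        simp [PySem.Set.contains]; exact h
      have ha : PySem.Set.add (xs : PySem.Set String) t = xs ++ [t] := by
        simp [PySem.Set.add, PySem.Set.contains]; exact h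
      rw [if_neg (show ¬ PySem.Set.contains (xs : PySem.Set String) t = true from by
        simp [PySem.Set.contains]; exact h),
        if_neg h, ha, ih]

theorem aFor_step (weight : String) (edges : List (List String)) (fuel i : Nat) (xs : List String)
    (hi : i < xs.length) :
    aFor weight edges (fuel+1) i xs
      = aFor weight edges fuel (i+1) (pvExt xs (pvCollect weight edges (xs.getD i ""))) := by
  simp only [aFor, if_pos hi]
  congr 1
  have hadd := getStats_eq (xs.getD i "") weight edges
  by_cases h0 : 0 < (getStatsFromNode (xs.getD i "") weight edges true).length
  · rw [if_pos h0]
    show pvExt xs (getStatsFromNode (xs.getD i "") weight edges true) = _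
    rw [hadd, pvExt_pvExt]
    rfl
  · rw [if_neg h0]
    have hnil : getStatsFromNode (xs.getD i "") weight edges true = [] :=
      List.eq_nil_of_length_eq_zero (by omega)
    have : pvCollect weight edges (xs.getD i "") = [] :=
      pvExt_eq_nil _ (hadd ▸ hnil)
    rw [this]
    rfl

theorem aFor_stop (weight : String) (edges : List (List String)) (fuel i : Nat) (xs : List String)
    (hi : ¬ i < xs.length) : aFor weight edges fuel i xs = xs := by
  cases fuel with
  | zero => rfl
  | succ fuel => simp [aFor, hi]

theorem loops_eq (weight : String) (edges : List (List String))
    (hEq : ∀ n ∈ pvTgts weight edges, pvCollect weight edges n = pvCollectB weight edges n) :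
    ∀ (fuel i : Nat) (xs : List String), (∀ x ∈ xs, x ∈ pvTgts weight edges) →
    bLoop (bBuildAdj weight edges) fuel i (xs, xs) = (aFor weight edges fuel i xs, aFor weight edges fuel i xs) := by
  intro fuel
  induction fuel with
  | zero => intro i xs _; rfl
  | succ fuel ih =>
    intro i xs hT
    by_cases hi : i < xs.length
    · rw [aFor_step weight edges fuel i xs hi]
      have hnT : xs.getD i "" ∈ pvTgts weight edges := by
        apply hT
        rw [List.getD_eq_getElem xs "" hi]
        exact List.getElem_mem hi
      show bLoop _ (fuel+1) i (xs, xs) = _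
      simp only [bLoop, if_pos hi]
      rw [adj_getD, ← hEq _ hnT, bCollect_pair]
      apply ih
      intro x hx
      rcases (mem_pvExt _ _ _).1 hx with h | h
      · exact hT x h
      · rw [hEq _ hnT] at h
        exact collectB_sub_tgts weight edges _ x h
    · rw [aFor_stop weight edges (fuel+1) i xs hi]
      simp [bLoop, hi]

-- the set of still-unreached target labels; it shrinks by one for every append
def pvMu (edges : List (List String)) (xs : List String) : Nat :=
  ((edges.map (fun e => e.getD 1 "")).filter (fun v => !(decide (v ∈ xs)))).length

theorem filt_lt (u : List String) (t : String) : ∀ (xs : List String), t ∈ u → t ∉ xs →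
    (u.filter (fun v => !(decide (v ∈ xs ++ [t])))).length < (u.filter (fun v => !(decide (v ∈ xs)))).length := by
  induction u with
  | nil => intro xs hu _; cases hu
  | cons h rest ih =>
    intro xs hu hx
    simp only [List.filter_cons]
    by_cases hh : h = t
    · subst hh
      have e1 : (!(decide (h ∈ xs ++ [h]))) = false := by simp
      have e2 : (!(decide (h ∈ xs))) = true := by simp [hx]
      rw [e1, e2]
      refine Nat.lt_succ_of_le ?_
      exact (List.monotone_filter_right rest (fun v hv => by
        simp only [Bool.not_eq_eq_eq_not, Bool.not_true, decide_eq_false_iff_not] at hv ⊢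
        intro hmem; exact hv (by simp [hmem]))).length_le
    · have ht : t ∈ rest := by
        rcases List.mem_cons.mp hu with h' | h'
        · exact absurd h'.symm hh
        · exact h'
      have hpred : (!(decide (h ∈ xs ++ [t]))) = (!(decide (h ∈ xs))) := by
        simp [List.mem_append, hh]
      rw [hpred]
      by_cases hhx : h ∈ xs
      · simp only [decide_eq_true hhx, Bool.not_true, Bool.false_eq_true, if_false]
        exact ih xs ht hx
      · simp only [decide_eq_false hhx, Bool.not_false, if_true]
        exact Nat.succ_lt_succ (ih xs ht hx)

theorem pvExt_measure (u : List String) (L : List String) : ∀ (xs : List String), (∀ y ∈ L, y ∈ u) →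
    (u.filter (fun v => !(decide (v ∈ pvExt xs L)))).length + (pvExt xs L).length
      ≤ (u.filter (fun v => !(decide (v ∈ xs)))).length + xs.length := by
  induction L with
  | nil => intro xs _; exact le_refl _
  | cons t L ih =>
    intro xs hsub
    rw [pvExt_cons]
    by_cases h : t ∈ xs
    · rw [if_pos h]
      exact ih xs fun y hy => hsub y (by simp [hy])
    · rw [if_neg h]
      have h1 := ih (xs ++ [t]) (fun y hy => hsub y (by simp [hy]))
      have h2 := filt_lt u t xs (hsub t (by simp)) h
      have h3 : (xs ++ [t]).length = xs.length + 1 := by simp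
      omega

theorem collect_sub_univ (weight : String) (edges : List (List String)) (n : String) :
    ∀ y ∈ pvCollect weight edges n, y ∈ edges.map (fun e => e.getD 1 "") := by
  induction edges with
  | nil => intro y hy; cases hy
  | cons e rest ih =>
    intro y hy
    rw [pvCollect_cons] at hy
    by_cases h : e.getD 0 "" = n ∧ (e.getD 2 "" = weight ∨ e.getD 2 "" = "&")
    · rw [if_pos h] at hy
      rw [List.map_cons]
      rcases List.mem_cons.mp hy with h' | h'
      · rw [h']; exact List.mem_cons_self ..
      · exact List.mem_cons_of_mem _ (ih y h')
    · rw [if_neg h] at hy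
      rw [List.map_cons]
      exact List.mem_cons_of_mem _ (ih y hy)

theorem mu_le (edges : List (List String)) (xs : List String) : pvMu edges xs ≤ edges.length := by
  calc pvMu edges xs ≤ (edges.map (fun e => e.getD 1 "")).length := List.length_filter_le _ _
    _ = edges.length := List.length_map ..

-- after the pass, every reached node's successors are already in the list
theorem pass_closed (weight : String) (edges : List (List String)) : ∀ (fuel i : Nat) (xs : List String),
    (∀ x ∈ xs.take i, ∀ y ∈ pvCollect weight edges x, y ∈ xs) →
    pvMu edges xs + xs.length ≤ i + fuel →
    ∀ x ∈ aFor weight edges fuel i xs, ∀ y ∈ pvCollect weight edges x, y ∈ aFor weight edges fuel i xs := by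
  intro fuel
  induction fuel with
  | zero =>
    intro i xs hinv hb
    have hlen : xs.length ≤ i := by omega
    have hx : xs.take i = xs := List.take_of_length_le hlen
    rw [hx] at hinv
    exact hinv
  | succ fuel ih =>
    intro i xs hinv hb
    by_cases hi : i < xs.length
    · rw [aFor_step weight edges fuel i xs hi]
      set n := xs.getD i "" with hn
      set L := pvCollect weight edges n with hL
      apply ih (i+1) (pvExt xs L)
      · obtain ⟨s, hs⟩ := pvExt_append_suffix L xs
        intro x hx y hy
        rw [hs, List.take_append_of_le_length (by omega), List.take_add_one] at hx
        rcases List.mem_append.mp hx with hx' | hx'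
        · have := hinv x hx' y hy
          rw [hs]; exact List.mem_append_left _ this
        · have hxi : x = n := by
            have : xs[i]? = some xs[i] := List.getElem?_eq_getElem hi
            rw [this] at hx'
            simp only [Option.toList_some, List.mem_singleton] at hx'
            rw [hx', hn, List.getD_eq_getElem xs "" hi]
          rw [hxi] at hy
          exact (mem_pvExt L xs y).2 (Or.inr hy)
      · have hm := pvExt_measure (edges.map (fun e => e.getD 1 "")) L xs (collect_sub_univ weight edges n)
        have : pvMu edges (pvExt xs L) + (pvExt xs L).length ≤ pvMu edges xs + xs.length := hm
        omega
    · rw [aFor_stop weight edges (fuel+1) i xs hi]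
      have hlen : xs.length ≤ i := by omega
      have hx : xs.take i = xs := List.take_of_length_le hlen
      rw [hx] at hinv
      exact hinv

theorem aFor_closed_id (weight : String) (edges : List (List String)) (xs : List String)
    (hC : ∀ x ∈ xs, ∀ y ∈ pvCollect weight edges x, y ∈ xs) :
    ∀ (fuel i : Nat), aFor weight edges fuel i xs = xs := by
  intro fuel
  induction fuel with
  | zero => intro i; rfl
  | succ fuel ih =>
    intro i
    by_cases hi : i < xs.length
    · rw [aFor_step weight edges fuel i xs hi]
      have hmem : xs.getD i "" ∈ xs := by
        rw [List.getD_eq_getElem xs "" hi]; exact List.getElem_mem hi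
      rw [pvExt_sub _ xs (hC _ hmem), ih]
    · exact aFor_stop weight edges (fuel+1) i xs hi

theorem aWhile_step (weight : String) (edges : List (List String)) (fuel lenD : Nat) (xs : List String)
    (h : xs.length ≠ lenD) :
    aWhile weight edges (fuel+1) lenD xs
      = aWhile weight edges fuel xs.length (aFor weight edges (xs.length + edges.length) 0 xs) := by
  simp only [aWhile, if_pos h]

theorem aWhile_stop (weight : String) (edges : List (List String)) (fuel lenD : Nat) (xs : List String)
    (h : ¬ xs.length ≠ lenD) : aWhile weight edges (fuel+1) lenD xs = xs := by
  simp only [aWhile, if_neg h]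

-- ===== VERDICT (by name: the statement is the Claim_ definition above) =====
theorem getAllStatesNode_spec : Claim_equal_getAllStatesNode := by
  intro idNumber weight edges _ hpre
  unfold Spec_getAllStatesNode
  -- Pre_ makes A's scan and B's adjacency dict agree on idNumber and on every possible target
  have hEq : ∀ n, (n = idNumber ∨ n ∈ pvTgts weight edges) →
      pvCollect weight edges n = pvCollectB weight edges n := by
    intro n hn
    apply collect_eq
    intro e he h0
    rcases hpre e he with h | ⟨_, hid, htg⟩
    · exact h
    · rcases hn with h | h
      · exact absurd (h0.trans h) hid
      · obtain ⟨e', he', hlen', hfire', hn'⟩ := mem_pvTgts weight edges n h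
        exact absurd (h0.trans hn'.symm) (htg e' he' hlen' hfire')
  have hid : pvCollect weight edges idNumber = pvCollectB weight edges idNumber :=
    hEq idNumber (Or.inl rfl)
  have hB : getAllStatesNode_alt idNumber weight edges
      = aFor weight edges ((getStatsFromNode idNumber weight edges true).length + edges.length) 0
          (getStatsFromNode idNumber weight edges true) := by
    have h0 : bCollect ([], PySem.Set.empty) ((bBuildAdj weight edges).getD idNumber [])
        = (getStatsFromNode idNumber weight edges true, getStatsFromNode idNumber weight edges true) := by
      rw [adj_getD, ← hid, getStats_eq]
      exact bCollect_pair (pvCollect weight edges idNumber) []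
    have hT : ∀ x ∈ getStatsFromNode idNumber weight edges true, x ∈ pvTgts weight edges := by
      intro x hx
      rw [getStats_eq] at hx
      rcases (mem_pvExt _ _ _).1 hx with h | h
      · cases h
      · rw [hid] at h
        exact collectB_sub_tgts weight edges _ x h
    show (bLoop (bBuildAdj weight edges)
        ((bCollect ([], PySem.Set.empty) ((bBuildAdj weight edges).getD idNumber [])).1.length + edges.length) 0
        (bCollect ([], PySem.Set.empty) ((bBuildAdj weight edges).getD idNumber []))).1 = _
    rw [h0, loops_eq weight edges (fun n hn => hEq n (Or.inr hn)) _ 0 _ hT]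
  rw [hB]
  show aWhile weight edges (edges.length + 2) 0 (getStatsFromNode idNumber weight edges true) = _
  by_cases hnil : getStatsFromNode idNumber weight edges true = []
  · rw [hnil, aFor_stop weight edges _ 0 [] (by simp)]
    exact aWhile_stop weight edges (edges.length + 1) 0 [] (by simp)
  · set xs := getStatsFromNode idNumber weight edges true with hxs
    have hE : edges ≠ [] := fun h => hnil (by rw [hxs, h]; rfl)
    obtain ⟨k, hk⟩ : ∃ k, edges.length = k + 1 := by
      cases edges with
      | nil => exact absurd rfl hE
      | cons e rest => exact ⟨rest.length, by simp⟩
    have hlen : xs.length ≠ 0 := fun h => hnil (List.eq_nil_of_length_eq_zero h)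
    set y := aFor weight edges (xs.length + edges.length) 0 xs with hy
    have hyc : ∀ x ∈ y, ∀ z ∈ pvCollect weight edges x, z ∈ y := by
      rw [hy]
      exact pass_closed weight edges (xs.length + edges.length) 0 xs
        (by intro x hx; simp at hx)
        (by have := mu_le edges xs; omega)
    calc aWhile weight edges (edges.length + 2) 0 xs
        = aWhile weight edges (edges.length + 1) xs.length y := by
          rw [show edges.length + 2 = (edges.length + 1) + 1 from rfl,
            aWhile_step weight edges (edges.length + 1) 0 xs hlen]
      _ = y := by
          by_cases hl : y.length = xs.length
          · exact aWhile_stop weight edges edges.length xs.length y (by omega)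
          · rw [hk, show k + 1 + 1 = (k + 1) + 1 from rfl,
              aWhile_step weight edges (k + 1) xs.length y (by omega),
              aFor_closed_id weight edges y hyc]
            exact aWhile_stop weight edges k y.length y (by omega)
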